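-- pv_equiv track=rewrite | github.com/EmiliaSe/Find-Duplicate-Files | findduplicatefiles.py | groupDuplicateSize
-- ===== SOURCE A (Python) =====
-- def groupDuplicateSize(allFiles):
--     #1st group duplicates
--     rev_dict = {}
--     for key, value in allFiles.items():
--         rev_dict.setdefault(value, set()).add(key)
--     #remove unique values
--     onlyDuplicates = {}
--     for key, values in rev_dict.items():
--         if (len(values) > 1):
--             onlyDuplicates[key] = values
--     return onlyDuplicates
-- ===== SOURCE B (Python) =====
-- def groupDuplicateSize(allFiles):
--     # count files per size first, then build only the duplicate groups
--     counts = {}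
--     for size in allFiles.values():
--         counts[size] = counts.get(size, 0) + 1
--     result = {}
--     for key, size in allFiles.items():
--         if counts[size] > 1:
--             result.setdefault(size, set()).add(key)
--     return result
-- ===== Notes on version B (the rewrite author's own statement) =====
-- stated objective: alternative
-- what changed: B replaces A's build-all-groups-then-filter with a count-first strategy: a first pass builds a size-frequency table, a second pass inserts only keys whose size occurs more than once, so singleton groups are never constructed.
import Mathlib
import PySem

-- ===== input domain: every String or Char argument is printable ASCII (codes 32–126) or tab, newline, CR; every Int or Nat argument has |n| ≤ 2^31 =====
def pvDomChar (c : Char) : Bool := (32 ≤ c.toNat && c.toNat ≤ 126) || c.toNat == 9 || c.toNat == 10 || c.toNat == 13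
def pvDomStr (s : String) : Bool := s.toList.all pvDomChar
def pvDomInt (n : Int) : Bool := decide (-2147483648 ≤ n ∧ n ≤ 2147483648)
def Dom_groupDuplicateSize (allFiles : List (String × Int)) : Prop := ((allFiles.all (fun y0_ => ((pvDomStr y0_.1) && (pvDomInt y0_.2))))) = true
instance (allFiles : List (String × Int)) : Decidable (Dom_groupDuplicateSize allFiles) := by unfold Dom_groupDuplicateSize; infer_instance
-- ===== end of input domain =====

-- B counts files per size first and then builds only the duplicate groups, instead of A's
-- build-every-group-then-filter (alternative decomposition, same return value on Pre_).

-- ===== PORT A =====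
-- rev_dict.setdefault(value, set()).add(key)  ≡  rev_dict[value] = rev_dict.get(value, set()) ∪ {key}  → Dict.modify
def groupDuplicateSize (allFiles : List (String × Int)) : List (Int × List String) :=
  let revDict :=
    allFiles.foldl
      (fun d kv => d.modify kv.2 PySem.Set.empty (fun g => PySem.Set.add g kv.1))
      PySem.Dict.empty
  let onlyDuplicates :=
    revDict.items.foldl
      (fun od kv => if 1 < PySem.Set.len kv.2 then od.insert kv.1 kv.2 else od)
      PySem.Dict.empty
  onlyDuplicates.items

-- ===== PORT B =====
def groupDuplicateSize_alt (allFiles : List (String × Int)) : List (Int × List String) :=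
  let counts : PySem.Dict Int Int :=
    (allFiles.map Prod.snd).foldl
      (fun c s => c.insert s (c.getD s 0 + 1))
      PySem.Dict.empty
  let result :=
    allFiles.foldl
      (fun r kv =>
        if 1 < counts.getD kv.2 0 then
          r.modify kv.2 PySem.Set.empty (fun g => PySem.Set.add g kv.1)
        else r)
      PySem.Dict.empty
  result.items

-- ===== PRECONDITION & SPEC =====
-- Pre_ excludes association lists with duplicate file-name keys: A's argument is a Python dict,
-- whose keys are necessarily distinct, so such lists are artefacts of the List encoding.
def Pre_groupDuplicateSize (allFiles : List (String × Int)) : Prop :=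
  (allFiles.map Prod.fst).Nodup
instance (allFiles : List (String × Int)) : Decidable (Pre_groupDuplicateSize allFiles) := by
  unfold Pre_groupDuplicateSize; infer_instance

def pvWitness_groupDuplicateSize : (List (String × Int)) :=
  [("a.txt", 3), ("b.txt", 3), ("c.txt", 5)]

def Spec_groupDuplicateSize (allFiles : List (String × Int)) (out : List (Int × List String)) : Prop := out = groupDuplicateSize_alt allFiles
instance (allFiles : List (String × Int)) (out : List (Int × List String)) : Decidable (Spec_groupDuplicateSize allFiles out) := by unfold Spec_groupDuplicateSize; infer_instance

-- ===== CLAIM (what is proved, stated in full; the proofs are below) =====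
def Claim_equal_groupDuplicateSize : Prop := ∀ (allFiles : List (String × Int)), Dom_groupDuplicateSize allFiles → Pre_groupDuplicateSize allFiles → Spec_groupDuplicateSize allFiles (groupDuplicateSize allFiles)

-- ===== LEMMAS AND PROOFS =====

-- the grouping loop both programs run (proof-side name)
def revD (l : List (String × Int)) : PySem.Dict Int (PySem.Set String) :=
  l.foldl (fun d kv => d.modify kv.2 PySem.Set.empty (fun g => PySem.Set.add g kv.1))
    PySem.Dict.empty

-- the group of file names of size s, in list order
def grp (s : Int) (l : List (String × Int)) : List String :=
  (l.filter (fun kv => kv.2 == s)).map Prod.fst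

lemma keys_revD (l : List (String × Int)) :
    (revD l).keys = PySem.Set.ofList (l.map Prod.snd) := by
  have := PySem.Dict.keys_foldl_modify_key l Prod.snd PySem.Set.empty
    (fun _ kv => fun g => PySem.Set.add g kv.1) PySem.Dict.empty
  simpa [revD, PySem.Dict.keys_empty] using this

lemma nodup_keys_revD (l : List (String × Int)) : (revD l).keys.Nodup := by
  exact PySem.Dict.nodup_keys_foldl_modify_key l Prod.snd PySem.Set.empty
    (fun _ kv => fun g => PySem.Set.add g kv.1) PySem.Dict.empty (by simp)

lemma mem_grp {y : String} {s : Int} {l : List (String × Int)} (hy : y ∈ grp s l) :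
    y ∈ l.map Prod.fst := by
  simp only [grp, List.mem_map, List.mem_filter] at hy
  obtain ⟨kv, ⟨hkv, _⟩, rfl⟩ := hy
  exact List.mem_map_of_mem hkv

lemma getD_revD (l : List (String × Int)) (h : (l.map Prod.fst).Nodup) (s : Int) :
    (revD l).getD s PySem.Set.empty = grp s l := by
  induction l using List.reverseRecOn with
  | nil => simp [revD, grp, PySem.Dict.getD_empty]
  | append_singleton l x ih =>
    have hn := List.nodup_append.mp (by simpa using h)
    have hl : (l.map Prod.fst).Nodup := hn.1
    have hx : x.1 ∉ l.map Prod.fst := fun hm => (hn.2.2 x.1 hm x.1 (by simp)) rfl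
    have step : revD (l ++ [x])
        = (revD l).modify x.2 PySem.Set.empty (fun g => PySem.Set.add g x.1) := by
      simp [revD, List.foldl_append]
    rw [step, PySem.Dict.getD_modify]
    by_cases hs : s = x.2
    · subst hs
      rw [if_pos rfl, ih hl]
      have hnot : x.1 ∉ grp x.2 l := fun hm => hx (mem_grp hm)
      have : PySem.Set.add (grp x.2 l) x.1 = grp x.2 l ++ [x.1] := by
        simp [PySem.Set.add, PySem.Set.contains, hnot]
      rw [this]
      simp [grp, List.filter_append, List.map_append]
    · rw [if_neg hs, ih hl]
      simp [grp, List.filter_append, Ne.symm hs]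

lemma items_revD (l : List (String × Int)) (h : (l.map Prod.fst).Nodup) :
    (revD l).items
      = (PySem.Set.ofList (l.map Prod.snd)).map (fun s => (s, grp s l)) := by
  rw [PySem.Dict.items_eq_map_keys (revD l) (nodup_keys_revD l) PySem.Set.empty, keys_revD]
  exact List.map_congr_left (fun s _ => by rw [getD_revD l h s])

lemma items_foldl_insert_if (p : Int × List String → Bool) (L : List (Int × List String))
    (h : (L.map Prod.fst).Nodup) :
    (L.foldl (fun od kv => if p kv then od.insert kv.1 kv.2 else od) PySem.Dict.empty).items
      = L.filter p := by
  induction L using List.reverseRecOn with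
  | nil => simp [PySem.Dict.empty]
  | append_singleton L x ih =>
    have hn := List.nodup_append.mp (by simpa using h)
    have hx : x.1 ∉ L.map Prod.fst := fun hm => (hn.2.2 x.1 hm x.1 (by simp)) rfl
    rw [List.foldl_append, List.foldl_cons, List.foldl_nil, List.filter_append]
    set d := L.foldl (fun od kv => if p kv then od.insert kv.1 kv.2 else od) PySem.Dict.empty with hd
    have hitems : d.items = L.filter p := ih hn.1
    by_cases hp : p x = true
    · rw [if_pos hp]
      have hc : d.contains x.1 = false := by
        by_contra hcc
        have : d.contains x.1 = true := by simpa using hcc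
        have hk : x.1 ∈ d.keys := (PySem.Dict.contains_iff_mem_keys d x.1).mp this
        have : x.1 ∈ (L.filter p).map Prod.fst := by
          simpa [PySem.Dict.keys, hitems] using hk
        obtain ⟨kv, hkv, hfst⟩ := List.mem_map.mp this
        exact hx (hfst ▸ List.mem_map_of_mem (List.mem_of_mem_filter hkv))
      rw [PySem.Dict.items_insert_of_not_contains d x.2 hc, hitems]
      simp [hp]
    · rw [if_neg hp, hitems]
      simp [hp]

lemma ofList_filter (q : Int → Bool) (xs : List Int) :
    PySem.Set.ofList (xs.filter q) = (PySem.Set.ofList xs).filter q := by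
  induction xs using List.reverseRecOn with
  | nil => simp [PySem.Set.ofList]
  | append_singleton xs x ih =>
    have hof : ∀ (ys : List Int) (y : Int), PySem.Set.ofList (ys ++ [y])
        = PySem.Set.add (PySem.Set.ofList ys) y := by
      intro ys y; simp [PySem.Set.ofList_eq_foldl, List.foldl_append]
    by_cases hq : q x = true
    · rw [List.filter_append]
      simp only [List.filter_cons, hq, if_pos, List.filter_nil]
      rw [hof, hof, ih]
      by_cases hm : x ∈ PySem.Set.ofList xs
      · have hm' : x ∈ (PySem.Set.ofList xs).filter q := by
          refine List.mem_filter.mpr ⟨hm, hq⟩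
        simp [PySem.Set.add, PySem.Set.contains, hm, hm']
      · have hm' : x ∉ (PySem.Set.ofList xs).filter q := fun hc => hm (List.mem_of_mem_filter hc)
        simp [PySem.Set.add, PySem.Set.contains, hm, hm', List.filter_append, hq]
    · have hq' : q x = false := by simpa using hq
      have h1 : List.filter q (xs ++ [x]) = List.filter q xs := by
        simp [List.filter_append, hq']
      rw [h1, hof, ih]
      by_cases hm : x ∈ PySem.Set.ofList xs
      · simp [PySem.Set.add, PySem.Set.contains, hm]
      · simp [PySem.Set.add, PySem.Set.contains, hm, List.filter_append, hq']

lemma length_grp (s : Int) (l : List (String × Int)) :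
    (grp s l).length = (l.map Prod.snd).count s := by
  rw [grp, List.length_map, List.count, List.countP_map, ← List.countP_eq_length_filter]
  rfl

lemma grp_filter (q : Int → Bool) (s : Int) (hq : q s = true) (l : List (String × Int)) :
    grp s (l.filter (fun kv => q kv.2)) = grp s l := by
  unfold grp
  rw [List.filter_filter]
  congr 1
  apply List.filter_congr
  intro kv _
  by_cases h2 : kv.2 = s
  · simp [h2, hq]
  · simp [h2]

lemma groupDuplicateSize_eq (l : List (String × Int)) (h : (l.map Prod.fst).Nodup) :
    groupDuplicateSize l = groupDuplicateSize_alt l := by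
  -- the shared duplicate-size predicate
  set q : Int → Bool := fun s => decide (1 < ((l.map Prod.snd).count s : Int)) with hq
  -- ===== A side =====
  have hA : groupDuplicateSize l
      = ((PySem.Set.ofList (l.map Prod.snd)).filter q).map (fun s => (s, grp s l)) := by
    show ((revD l).items.foldl
        (fun od kv => if 1 < PySem.Set.len kv.2 then od.insert kv.1 kv.2 else od)
        PySem.Dict.empty).items = _
    have hnk : ((revD l).items.map Prod.fst).Nodup := by
      rw [items_revD l h, List.map_map]
      exact (PySem.Set.nodup_ofList _).map (fun a b hab => by simpa using hab)
    have hcond : ∀ (od : PySem.Dict Int (PySem.Set String)) (kv : Int × List String),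
        (if 1 < PySem.Set.len kv.2 then od.insert kv.1 kv.2 else od)
          = (if (fun kv : Int × List String => decide (1 < PySem.Set.len kv.2)) kv = true
             then od.insert kv.1 kv.2 else od) := by
      intro od kv; simp
    have : ((revD l).items.foldl
        (fun od kv => if 1 < PySem.Set.len kv.2 then od.insert kv.1 kv.2 else od)
        PySem.Dict.empty).items
        = (revD l).items.filter (fun kv => decide (1 < PySem.Set.len kv.2)) := by
      rw [show (fun (od : PySem.Dict Int (PySem.Set String)) (kv : Int × List String) =>
            if 1 < PySem.Set.len kv.2 then od.insert kv.1 kv.2 else od)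
          = (fun od kv => if (fun kv : Int × List String => decide (1 < PySem.Set.len kv.2)) kv = true
            then od.insert kv.1 kv.2 else od) from funext fun od => funext fun kv => hcond od kv]
      exact items_foldl_insert_if _ _ hnk
    rw [this, items_revD l h, List.filter_map]
    congr 1
    apply List.filter_congr
    intro s _
    simp only [Function.comp_apply, hq, PySem.Set.len, length_grp]
  -- ===== B side =====
  have hB : groupDuplicateSize_alt l
      = ((PySem.Set.ofList (l.map Prod.snd)).filter q).map
          (fun s => (s, grp s (l.filter (fun kv => q kv.2)))) := by
    show (l.foldl
        (fun r kv =>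
          if 1 < (((l.map Prod.snd).foldl (fun c s => c.insert s (c.getD s 0 + 1))
              PySem.Dict.empty : PySem.Dict Int Int)).getD kv.2 0 then
            r.modify kv.2 PySem.Set.empty (fun g => PySem.Set.add g kv.1)
          else r)
        PySem.Dict.empty).items = _
    have hfun : (fun (r : PySem.Dict Int (PySem.Set String)) (kv : String × Int) =>
          if 1 < (((l.map Prod.snd).foldl (fun c s => c.insert s (c.getD s 0 + 1))
              PySem.Dict.empty : PySem.Dict Int Int)).getD kv.2 0 then
            r.modify kv.2 PySem.Set.empty (fun g => PySem.Set.add g kv.1)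
          else r)
        = (fun r kv =>
          if (fun kv : String × Int => q kv.2) kv = true then
            r.modify kv.2 PySem.Set.empty (fun g => PySem.Set.add g kv.1)
          else r) := by
      funext r kv
      simp only [PySem.Dict.getD_foldl_insert_add_one, PySem.Dict.getD_empty, zero_add]
      simp [hq]
    rw [hfun, ← List.foldl_filter]
    have hnf : ((l.filter (fun kv => q kv.2)).map Prod.fst).Nodup :=
      List.Nodup.sublist (List.Sublist.map Prod.fst List.filter_sublist) h
    have : (revD (l.filter (fun kv => q kv.2))).items
        = (PySem.Set.ofList ((l.filter (fun kv => q kv.2)).map Prod.snd)).map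
            (fun s => (s, grp s (l.filter (fun kv => q kv.2)))) := items_revD _ hnf
    rw [show (l.filter (fun kv => q kv.2)).foldl
          (fun r kv => r.modify kv.2 PySem.Set.empty (fun g => PySem.Set.add g kv.1))
          PySem.Dict.empty = revD (l.filter (fun kv => q kv.2)) from rfl, this]
    have hms : (l.filter (fun kv => q kv.2)).map Prod.snd = (l.map Prod.snd).filter q := by
      rw [List.filter_map]; rfl
    rw [hms, ofList_filter]
  rw [hA, hB]
  exact List.map_congr_left (fun s hs => by
    rw [grp_filter q s (List.of_mem_filter hs) l])

-- ===== VERDICT (by name: the statement is the Claim_ definition above) =====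
theorem groupDuplicateSize_spec : Claim_equal_groupDuplicateSize := by
  intro l _ hpre
  unfold Spec_groupDuplicateSize
  exact groupDuplicateSize_eq l hpre
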